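-- pv_equiv track=rewrite | github.com/redhi/Algorithm-Study | 코테준비/프로그래머스/규칙찾기/순위.py | solution
-- ===== SOURCE A (Python) =====
-- from collections import defaultdict
--
-- def solution(n, results):
--     answer = 0
--     winner_list = defaultdict(set)
--     loser_list = defaultdict(set)
--
--     for winner, loser in results:
--         winner_list[loser].add(winner)
--         loser_list[winner].add(loser)
--
--     for i in range(1, n + 1):
--         for winner in winner_list[i]:
--             loser_list[winner].update(loser_list[i])
--         for loser in loser_list[i]:
--             winner_list[loser].update(winner_list[i])
--
--     for i in range(1, n + 1):
--         if (len(winner_list[i]) + len(loser_list[i])) == (n - 1):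
--             answer += 1
--
--     return answer
-- ===== SOURCE B (Python) =====
-- def solution(n, results):
--     # Per-player BFS over explicit win/loss adjacency lists: a player is fully
--     # ranked iff (#players they transitively beat) + (#players who transitively
--     # beat them) == n - 1.  Only actual players (1..n) are expanded as
--     # intermediate nodes of a path.
--     fwd = {}
--     bwd = {}
--     for winner, loser in results:
--         fwd.setdefault(winner, []).append(loser)
--         bwd.setdefault(loser, []).append(winner)
--
--     def reach(i, adj):
--         # BFS by levels from i; at most n levels are ever needed.
--         seen = set(adj.get(i, []))
--         frontier = adj.get(i, [])
--         for _ in range(n):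
--             if not frontier:
--                 break
--             nxt = []
--             for v in frontier:
--                 if 1 <= v <= n:
--                     for w in adj.get(v, []):
--                         if w not in seen:
--                             seen.add(w)
--                             nxt.append(w)
--             frontier = nxt
--         return seen
--
--     answer = 0
--     for i in range(1, n + 1):
--         if len(reach(i, fwd)) + len(reach(i, bwd)) == n - 1:
--             answer += 1
--     return answer
-- ===== Notes on version B (the rewrite author's own statement) =====
-- stated objective: alternative
-- what changed: Replaces A's single-pass Warshall-style propagation over two coupled dicts of winner/loser sets by an explicit graph search: build win/loss adjacency lists once, then for each player run a frontier-based BFS (expanding only players 1..n) forwards and backwards and count players whose two reachability sets total n-1.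
import Mathlib
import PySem

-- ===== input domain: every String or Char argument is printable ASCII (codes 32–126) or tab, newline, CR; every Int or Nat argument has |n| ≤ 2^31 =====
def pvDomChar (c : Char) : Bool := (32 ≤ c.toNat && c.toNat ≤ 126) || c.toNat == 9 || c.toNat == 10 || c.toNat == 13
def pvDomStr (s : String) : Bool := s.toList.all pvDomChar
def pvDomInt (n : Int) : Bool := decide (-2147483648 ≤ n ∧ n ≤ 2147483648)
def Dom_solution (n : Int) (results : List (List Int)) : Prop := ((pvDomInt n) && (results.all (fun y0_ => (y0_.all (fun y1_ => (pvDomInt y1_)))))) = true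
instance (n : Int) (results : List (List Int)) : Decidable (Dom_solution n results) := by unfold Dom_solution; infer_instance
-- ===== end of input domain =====

-- B replaces A's single-pass propagation over two coupled dicts of winner/loser sets by an
-- explicit per-player frontier BFS over win/loss adjacency lists; same return value on Pre_.

-- ===== PORT A =====
-- for winner, loser in results: winner_list[loser].add(winner); loser_list[winner].add(loser)
-- (state = (winner_list, loser_list); a row without exactly two entries raises ValueError in
--  Python and is excluded by Pre_solution: the `_ => st` branch is unreachable there)
def buildStep (st : PySem.Dict Int (PySem.Set Int) × PySem.Dict Int (PySem.Set Int))
    (r : List Int) : PySem.Dict Int (PySem.Set Int) × PySem.Dict Int (PySem.Set Int) :=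
  match r with
  | [winner, loser] =>
      (st.1.insert loser (PySem.Set.add (st.1.getD loser PySem.Set.empty) winner),
       st.2.insert winner (PySem.Set.add (st.2.getD winner PySem.Set.empty) loser))
  | _ => st

def buildA (results : List (List Int)) :
    PySem.Dict Int (PySem.Set Int) × PySem.Dict Int (PySem.Set Int) :=
  results.foldl buildStep (PySem.Dict.empty, PySem.Dict.empty)

-- for winner in winner_list[i]: loser_list[winner].update(loser_list[i])   (and the symmetric
-- second inner loop; loser_list[i] is re-read from the current dict on each iteration, as the
-- Python re-evaluates it inside the loop)
def mergeLoop (i : Int) (ws : List Int) (d : PySem.Dict Int (PySem.Set Int)) :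
    PySem.Dict Int (PySem.Set Int) :=
  ws.foldl
    (fun d w =>
      d.insert w (PySem.Set.update (d.getD w PySem.Set.empty) (d.getD i PySem.Set.empty))) d

-- body of `for i in range(1, n+1)`: the two inner update loops
def passStep (st : PySem.Dict Int (PySem.Set Int) × PySem.Dict Int (PySem.Set Int)) (i : Int) :
    PySem.Dict Int (PySem.Set Int) × PySem.Dict Int (PySem.Set Int) :=
  let ll := mergeLoop i (st.1.getD i PySem.Set.empty) st.2
  let wl := mergeLoop i (ll.getD i PySem.Set.empty) st.1
  (wl, ll)

def passA (n : Int)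
    (st : PySem.Dict Int (PySem.Set Int) × PySem.Dict Int (PySem.Set Int)) :
    PySem.Dict Int (PySem.Set Int) × PySem.Dict Int (PySem.Set Int) :=
  (PySem.List.pyRange 1 (n + 1) 1).foldl passStep st

def solution (n : Int) (results : List (List Int)) : Int :=
  let st := passA n (buildA results)
  (PySem.List.pyRange 1 (n + 1) 1).foldl
    (fun answer i =>
      if PySem.Set.len (st.1.getD i PySem.Set.empty)
          + PySem.Set.len (st.2.getD i PySem.Set.empty) = n - 1
      then answer + 1 else answer) 0

-- ===== PORT B =====
-- fwd.setdefault(winner, []).append(loser)  /  bwd.setdefault(loser, []).append(winner)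
def adjAdd (d : PySem.Dict Int (List Int)) (k v : Int) : PySem.Dict Int (List Int) :=
  d.insert k ((d.getD k []) ++ [v])

-- one row of results; a row without exactly two entries raises ValueError in Python and is
-- excluded by Pre_solution: the `_ => st` branch is unreachable there
def buildAdjStep (st : PySem.Dict Int (List Int) × PySem.Dict Int (List Int)) (r : List Int) :
    PySem.Dict Int (List Int) × PySem.Dict Int (List Int) :=
  match r with
  | [w, l] => (adjAdd st.1 w l, adjAdd st.2 l w)
  | _ => st

def buildAdj (results : List (List Int)) :
    PySem.Dict Int (List Int) × PySem.Dict Int (List Int) :=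
  results.foldl buildAdjStep (PySem.Dict.empty, PySem.Dict.empty)

-- for w in adj.get(v, []): if w not in seen: seen.add(w); nxt.append(w)
def bfsInner (st : PySem.Set Int × List Int) (ws : List Int) : PySem.Set Int × List Int :=
  ws.foldl (fun st w => if w ∈ st.1 then st else (PySem.Set.add st.1 w, st.2 ++ [w])) st

-- one BFS level: for v in frontier: if 1 <= v <= n: <inner loop>   (nxt starts empty)
def bfsRound (n : Int) (adj : PySem.Dict Int (List Int)) (seen : PySem.Set Int)
    (frontier : List Int) : PySem.Set Int × List Int :=
  frontier.foldl
    (fun st v => if 1 ≤ v ∧ v ≤ n then bfsInner st (adj.getD v []) else st) (seen, [])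

-- for _ in range(n): if not frontier: break; <one level>
def bfsLoop (n : Int) (adj : PySem.Dict Int (List Int)) :
    Nat → PySem.Set Int × List Int → PySem.Set Int
  | 0, st => st.1
  | Nat.succ m, st =>
      if st.2 = [] then st.1 else bfsLoop n adj m (bfsRound n adj st.1 st.2)

-- def reach(i, adj): seen = set(adj.get(i, [])); frontier = adj.get(i, []); ...
def reachB (n : Int) (adj : PySem.Dict Int (List Int)) (i : Int) : PySem.Set Int :=
  bfsLoop n adj n.toNat (PySem.Set.ofList (adj.getD i []), adj.getD i [])

def solution_alt (n : Int) (results : List (List Int)) : Int :=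
  let ad := buildAdj results
  (PySem.List.pyRange 1 (n + 1) 1).foldl
    (fun answer i =>
      if PySem.Set.len (reachB n ad.1 i) + PySem.Set.len (reachB n ad.2 i) = n - 1
      then answer + 1 else answer) 0

-- ===== PRECONDITION & SPEC =====
-- Pre_solution: every row of results has exactly two entries; on any other row Python A
-- raises ValueError while unpacking (and B raises there too).
def Pre_solution (n : Int) (results : List (List Int)) : Prop :=
  ∀ r ∈ results, r.length = 2
instance (n : Int) (results : List (List Int)) : Decidable (Pre_solution n results) := by
  unfold Pre_solution; infer_instance

def pvWitness_solution : Int × List (List Int) := (3, [[1, 2], [2, 3]])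

def Spec_solution (n : Int) (results : List (List Int)) (out : Int) : Prop := out = solution_alt n results
instance (n : Int) (results : List (List Int)) (out : Int) : Decidable (Spec_solution n results out) := by unfold Spec_solution; infer_instance

-- ===== CLAIM (what is proved, stated in full; the proofs are below) =====
def Claim_equal_solution : Prop := ∀ (n : Int) (results : List (List Int)), Dom_solution n results → Pre_solution n results → Spec_solution n results (solution n results)

-- ===== LEMMAS AND PROOFS =====

-- Proof-side model of A's propagation: a single relation of (winner, loser) pairs closed
-- Warshall-style over the intermediates 1..n; both of A's dicts are shown to describe it.
def unpack2 (r : List Int) : Option (Int × Int) :=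
  match r with
  | [w, l] => some (w, l)
  | _ => none

def closeStep (reach : PySem.Set (Int × Int)) (k : Int) : PySem.Set (Int × Int) :=
  let ins : PySem.Set Int :=
    PySem.Set.ofList ((reach.filter (fun p => p.2 == k)).map (fun p => p.1))
  let outs : PySem.Set Int :=
    PySem.Set.ofList ((reach.filter (fun p => p.1 == k)).map (fun p => p.2))
  PySem.Set.union reach (PySem.Set.ofList (ins.flatMap (fun a => outs.map (fun b => (a, b)))))

def closeB (n : Int) (reach0 : PySem.Set (Int × Int)) : PySem.Set (Int × Int) :=
  (PySem.List.pyRange 1 (n + 1) 1).foldl closeStep reach0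

-- The joint invariant: both of A's dicts and the pair relation describe the same set of
-- pairs, and every stored set as well as the relation list is duplicate-free.
def StInv (wl ll : PySem.Dict Int (PySem.Set Int)) (R : PySem.Set (Int × Int)) : Prop :=
  (∀ a b : Int, a ∈ wl.getD b PySem.Set.empty ↔ (a, b) ∈ R) ∧
  (∀ a b : Int, b ∈ ll.getD a PySem.Set.empty ↔ (a, b) ∈ R) ∧
  (∀ a : Int, (wl.getD a PySem.Set.empty).Nodup) ∧
  (∀ a : Int, (ll.getD a PySem.Set.empty).Nodup) ∧
  R.Nodup

-- membership after one inner merge loop, for an abstract description Q of the incoming dict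
lemma mergeLoop_mem (i : Int) (Li : List Int) :
    ∀ (ws : List Int) (d : PySem.Dict Int (PySem.Set Int)) (Q : Int → Int → Prop),
      (∀ a b, b ∈ d.getD a PySem.Set.empty ↔ Q a b) →
      (∀ b, Q i b ↔ b ∈ Li) →
      ∀ a b, b ∈ (mergeLoop i ws d).getD a PySem.Set.empty ↔ Q a b ∨ (a ∈ ws ∧ b ∈ Li) := by
  intro ws
  induction ws with
  | nil => intro d Q hd _ a b; simpa [mergeLoop] using hd a b
  | cons w ws ih =>
      intro d Q hd hi a b
      have hstep : ∀ a b,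
          b ∈ ((d.insert w (PySem.Set.update (d.getD w PySem.Set.empty)
                (d.getD i PySem.Set.empty))).getD a PySem.Set.empty) ↔
            Q a b ∨ (a = w ∧ b ∈ Li) := by
        intro a b
        rw [PySem.Dict.getD_insert]
        by_cases haw : a = w
        · subst haw
          rw [if_pos rfl, PySem.Set.mem_update, hd a b, hd i b, hi b]
          tauto
        · rw [if_neg haw, hd a b]
          tauto
      have hi' : ∀ b, Q i b ∨ (i = w ∧ b ∈ Li) ↔ b ∈ Li := by
        intro b; rw [hi b]; tauto
      have := ih (d.insert w (PySem.Set.update (d.getD w PySem.Set.empty)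
          (d.getD i PySem.Set.empty))) (fun a b => Q a b ∨ (a = w ∧ b ∈ Li)) hstep hi' a b
      simp only [mergeLoop, List.foldl_cons] at this ⊢
      rw [this]
      simp only [List.mem_cons]
      tauto

-- the inner merge loop keeps every stored set duplicate-free
lemma mergeLoop_nodup (i : Int) :
    ∀ (ws : List Int) (d : PySem.Dict Int (PySem.Set Int)),
      (∀ a, (d.getD a PySem.Set.empty).Nodup) →
      ∀ a, ((mergeLoop i ws d).getD a PySem.Set.empty).Nodup := by
  intro ws
  induction ws with
  | nil => intro d hd a; simpa [mergeLoop] using hd a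
  | cons w ws ih =>
      intro d hd a
      simp only [mergeLoop, List.foldl_cons]
      refine ih _ ?_ a
      intro a'
      rw [PySem.Dict.getD_insert]
      split_ifs with h
      · exact PySem.Set.nodup_update _ _ (hd w)
      · exact hd a'

-- after the building loop, both dicts describe exactly the unpacked pairs of `results`
lemma buildFold_mem (results : List (List Int)) :
    ∀ (st : PySem.Dict Int (PySem.Set Int) × PySem.Dict Int (PySem.Set Int)) (a b : Int),
      (a ∈ (results.foldl buildStep st).1.getD b PySem.Set.empty ↔
        a ∈ st.1.getD b PySem.Set.empty ∨ (a, b) ∈ results.filterMap unpack2) ∧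
      (b ∈ (results.foldl buildStep st).2.getD a PySem.Set.empty ↔
        b ∈ st.2.getD a PySem.Set.empty ∨ (a, b) ∈ results.filterMap unpack2) := by
  induction results with
  | nil => intro st a b; simp
  | cons r rs ih =>
      intro st a b
      rcases r with _ | ⟨w, _ | ⟨l, _ | ⟨x, t⟩⟩⟩
      · simpa [buildStep, unpack2] using ih st a b
      · simpa [buildStep, unpack2] using ih st a b
      · -- r = [w, l]
        have hih := ih (buildStep st [w, l]) a b
        simp only [List.foldl_cons] at *
        constructor
        · rw [hih.1]
          simp only [buildStep, unpack2, List.filterMap_cons, PySem.Dict.getD_insert]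
          by_cases hbl : b = l
          · subst hbl
            rw [if_pos rfl, PySem.Set.mem_add]
            simp only [List.mem_cons, Prod.mk.injEq]
            tauto
          · rw [if_neg hbl]
            simp only [List.mem_cons, Prod.mk.injEq]
            tauto
        · rw [hih.2]
          simp only [buildStep, unpack2, List.filterMap_cons, PySem.Dict.getD_insert]
          by_cases haw : a = w
          · subst haw
            rw [if_pos rfl, PySem.Set.mem_add]
            simp only [List.mem_cons, Prod.mk.injEq]
            tauto
          · rw [if_neg haw]
            simp only [List.mem_cons, Prod.mk.injEq]
            tauto
      · simpa [buildStep, unpack2] using ih st a b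

lemma buildFold_nodup (results : List (List Int)) :
    ∀ (st : PySem.Dict Int (PySem.Set Int) × PySem.Dict Int (PySem.Set Int)),
      (∀ a, (st.1.getD a PySem.Set.empty).Nodup) →
      (∀ a, (st.2.getD a PySem.Set.empty).Nodup) →
      (∀ a, ((results.foldl buildStep st).1.getD a PySem.Set.empty).Nodup) ∧
      (∀ a, ((results.foldl buildStep st).2.getD a PySem.Set.empty).Nodup) := by
  induction results with
  | nil => intro st h1 h2; exact ⟨h1, h2⟩
  | cons r rs ih =>
      intro st h1 h2
      rcases r with _ | ⟨w, _ | ⟨l, _ | ⟨x, t⟩⟩⟩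
      · simpa [buildStep] using ih st h1 h2
      · simpa [buildStep] using ih st h1 h2
      · simp only [List.foldl_cons]
        refine ih _ ?_ ?_
        · intro a
          simp only [buildStep, PySem.Dict.getD_insert]
          split_ifs with h
          · exact PySem.Set.nodup_add _ _ (h1 l)
          · exact h1 a
        · intro a
          simp only [buildStep, PySem.Dict.getD_insert]
          split_ifs with h
          · exact PySem.Set.nodup_add _ _ (h2 w)
          · exact h2 a
      · simpa [buildStep] using ih st h1 h2

lemma mem_closeStep (R : PySem.Set (Int × Int)) (i : Int) (p : Int × Int) :
    p ∈ closeStep R i ↔ p ∈ R ∨ ((p.1, i) ∈ R ∧ (i, p.2) ∈ R) := by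
  rcases p with ⟨a, b⟩
  simp only [closeStep, PySem.Set.mem_union, PySem.Set.mem_ofList, List.mem_flatMap,
    List.mem_map, List.mem_filter, beq_iff_eq]
  constructor
  · rintro (h | ⟨x, ⟨⟨u, v⟩, ⟨huv, hv⟩, hu⟩, y, ⟨⟨s, t⟩, ⟨hst, hs⟩, ht⟩, hxy⟩)
    · exact Or.inl h
    · simp only at hu hv hs ht
      injection hxy with h1 h2
      subst h1; subst h2; subst hu; subst hv; subst hs; subst ht
      exact Or.inr ⟨huv, hst⟩
  · rintro (h | ⟨h1, h2⟩)
    · exact Or.inl h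
    · exact Or.inr ⟨a, ⟨(a, i), ⟨h1, rfl⟩, rfl⟩, b, ⟨(i, b), ⟨h2, rfl⟩, rfl⟩, rfl⟩

-- one step of A's pass preserves the joint invariant
lemma step_inv (i : Int) (wl ll : PySem.Dict Int (PySem.Set Int)) (R : PySem.Set (Int × Int))
    (h : StInv wl ll R) : StInv (passStep (wl, ll) i).1 (passStep (wl, ll) i).2 (closeStep R i) := by
  obtain ⟨hW, hL, hndW, hndL, hndR⟩ := h
  have hL' : ∀ a b, b ∈ (mergeLoop i (wl.getD i PySem.Set.empty) ll).getD a PySem.Set.empty ↔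
      (a, b) ∈ R ∨ (a ∈ wl.getD i PySem.Set.empty ∧ b ∈ ll.getD i PySem.Set.empty) :=
    mergeLoop_mem i (ll.getD i PySem.Set.empty) (wl.getD i PySem.Set.empty) ll
      (fun a b => (a, b) ∈ R) hL (fun b => (hL i b).symm)
  have hls : ∀ b, b ∈ (mergeLoop i (wl.getD i PySem.Set.empty) ll).getD i PySem.Set.empty ↔
      (i, b) ∈ R := by
    intro b
    rw [hL' i b]
    constructor
    · rintro (h | ⟨_, h⟩)
      · exact h
      · exact (hL i b).mp h
    · exact Or.inl
  have hW' : ∀ a b, b ∈ (mergeLoop i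
        ((mergeLoop i (wl.getD i PySem.Set.empty) ll).getD i PySem.Set.empty) wl).getD a
        PySem.Set.empty ↔
      (b, a) ∈ R ∨ (a ∈ (mergeLoop i (wl.getD i PySem.Set.empty) ll).getD i PySem.Set.empty ∧
        b ∈ wl.getD i PySem.Set.empty) :=
    mergeLoop_mem i (wl.getD i PySem.Set.empty)
      ((mergeLoop i (wl.getD i PySem.Set.empty) ll).getD i PySem.Set.empty) wl
      (fun a b => (b, a) ∈ R) (fun a b => hW b a) (fun b => (hW b i).symm)
  refine ⟨?_, ?_, ?_, ?_, ?_⟩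
  · intro a b
    show a ∈ (mergeLoop i _ wl).getD b PySem.Set.empty ↔ _
    refine (hW' b a).trans ?_
    rw [mem_closeStep]
    have h1 := hls b
    have h2 := hW a i
    tauto
  · intro a b
    show b ∈ (mergeLoop i _ ll).getD a PySem.Set.empty ↔ _
    refine (hL' a b).trans ?_
    rw [mem_closeStep]
    have h1 := hW a i
    have h2 := hL i b
    tauto
  · exact mergeLoop_nodup i _ wl hndW
  · exact mergeLoop_nodup i _ ll hndL
  · exact PySem.Set.nodup_union _ _ hndR

lemma fold_inv : ∀ (ks : List Int) (wl ll : PySem.Dict Int (PySem.Set Int))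
    (R : PySem.Set (Int × Int)), StInv wl ll R →
    StInv (ks.foldl passStep (wl, ll)).1 (ks.foldl passStep (wl, ll)).2 (ks.foldl closeStep R) := by
  intro ks
  induction ks with
  | nil => intro wl ll R h; exact h
  | cons k ks ih =>
      intro wl ll R h
      simp only [List.foldl_cons]
      have := step_inv k wl ll R h
      have heq : passStep (wl, ll) k = ((passStep (wl, ll) k).1, (passStep (wl, ll) k).2) := rfl
      rw [heq]
      exact ih _ _ _ this

-- A's final state satisfies the invariant against the closed pair relation
lemma stInv_final (n : Int) (results : List (List Int)) :
    StInv (passA n (buildA results)).1 (passA n (buildA results)).2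
      (closeB n (PySem.Set.ofList (results.filterMap unpack2))) := by
  have hinv0 : StInv (buildA results).1 (buildA results).2
      (PySem.Set.ofList (results.filterMap unpack2)) := by
    refine ⟨?_, ?_, ?_, ?_, PySem.Set.nodup_ofList _⟩
    · intro a b
      simp only [buildA]
      rw [(buildFold_mem results (PySem.Dict.empty, PySem.Dict.empty) a b).1]
      simp [PySem.Set.mem_ofList]
    · intro a b
      simp only [buildA]
      rw [(buildFold_mem results (PySem.Dict.empty, PySem.Dict.empty) a b).2]
      simp [PySem.Set.mem_ofList]
    · intro a
      simp only [buildA]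
      exact (buildFold_nodup results (PySem.Dict.empty, PySem.Dict.empty)
        (by intro a; simp) (by intro a; simp)).1 a
    · intro a
      simp only [buildA]
      exact (buildFold_nodup results (PySem.Dict.empty, PySem.Dict.empty)
        (by intro a; simp) (by intro a; simp)).2 a
  have hst : buildA results = ((buildA results).1, (buildA results).2) := rfl
  unfold passA closeB
  rw [hst]
  exact fold_inv _ _ _ _ hinv0

-- ===== paths =====
-- PathVia E S a b: a nonempty E-path from a to b all of whose intermediate vertices satisfy S
def PathVia (E : Int → Int → Prop) (S : Int → Prop) (a b : Int) : Prop :=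
  ∃ l : List Int, (∀ v ∈ l, S v) ∧ List.IsChain (fun x y => E x y) (a :: l ++ [b])

lemma pathVia_congr {E E' : Int → Int → Prop} {S S' : Int → Prop}
    (hE : ∀ x y, E x y ↔ E' x y) (hS : ∀ v, S v ↔ S' v) (a b : Int) :
    PathVia E S a b ↔ PathVia E' S' a b := by
  constructor <;> rintro ⟨l, hl, hc⟩ <;> refine ⟨l, ?_, ?_⟩
  · intro v hv; exact (hS v).mp (hl v hv)
  · exact hc.imp_of_mem_imp (fun a b _ _ h => (hE a b).mp h)
  · intro v hv; exact (hS v).mpr (hl v hv)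
  · exact hc.imp_of_mem_imp (fun a b _ _ h => (hE a b).mpr h)

lemma pathVia_mono {E : Int → Int → Prop} {S S' : Int → Prop}
    (hS : ∀ v, S v → S' v) {a b : Int} (h : PathVia E S a b) : PathVia E S' a b := by
  obtain ⟨l, hl, hc⟩ := h
  exact ⟨l, fun v hv => hS v (hl v hv), hc⟩

lemma pathVia_single {E : Int → Int → Prop} {S : Int → Prop} {a b : Int} (h : E a b) :
    PathVia E S a b :=
  ⟨[], by simp, by simpa using h⟩

lemma pathVia_snoc {E : Int → Int → Prop} {S : Int → Prop} {a v b : Int}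
    (h : PathVia E S a v) (hv : S v) (he : E v b) : PathVia E S a b := by
  obtain ⟨l, hl, hc⟩ := h
  refine ⟨l ++ [v], ?_, ?_⟩
  · intro x hx
    rcases List.mem_append.mp hx with hx | hx
    · exact hl x hx
    · simp at hx; subst hx; exact hv
  · have : a :: (l ++ [v]) ++ [b] = (a :: l ++ [v]) ++ [b] := by simp
    rw [this]
    refine List.IsChain.append hc (List.isChain_singleton b) ?_
    intro x hx y hy
    simp at hx hy
    have hlast : (a :: (l ++ [v])).getLast? = some v := by
      rw [← List.cons_append]; exact List.getLast?_concat
    rw [hlast] at hx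
    simp at hx
    subst hx; subst hy; exact he

lemma pathVia_trans_mid {E : Int → Int → Prop} {S : Int → Prop} {a k b : Int}
    (h1 : PathVia E S a k) (hk : S k) (h2 : PathVia E S k b) : PathVia E S a b := by
  obtain ⟨l1, hl1, hc1⟩ := h1
  obtain ⟨l2, hl2, hc2⟩ := h2
  refine ⟨l1 ++ k :: l2, ?_, ?_⟩
  · intro x hx
    rcases List.mem_append.mp hx with hx | hx
    · exact hl1 x hx
    · rcases List.mem_cons.mp hx with hx | hx
      · subst hx; exact hk
      · exact hl2 x hx
  · have heq : a :: (l1 ++ k :: l2) ++ [b] = (a :: l1 ++ [k]) ++ (l2 ++ [b]) := by simp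
    rw [heq]
    have hc2' := (List.isChain_cons.mp (by simpa using hc2))
    refine List.IsChain.append hc1 hc2'.2 ?_
    intro x hx y hy
    have hlast : (a :: l1 ++ [k]).getLast? = some k := List.getLast?_concat
    rw [hlast] at hx
    simp at hx
    subst hx
    exact hc2'.1 y hy

-- Warshall elimination: a path whose intermediates lie in S ∪ {k} is a pure-S path, or a
-- pure-S path to k followed by a pure-S path from k
lemma pathVia_elim_k {E : Int → Int → Prop} {S : Int → Prop} {k : Int} :
    ∀ (m : Nat) (a b : Int) (l : List Int), l.length ≤ m → (∀ v ∈ l, S v ∨ v = k) →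
      List.IsChain (fun x y => E x y) (a :: l ++ [b]) →
      PathVia E S a b ∨ (PathVia E S a k ∧ PathVia E S k b) := by
  intro m
  induction m with
  | zero =>
      intro a b l hm hl hc
      have : l = [] := List.eq_nil_of_length_eq_zero (Nat.le_zero.mp hm)
      subst this
      exact Or.inl ⟨[], by simp, hc⟩
  | succ m ih =>
      intro a b l hm hl hc
      by_cases hk : k ∈ l
      · obtain ⟨l1, l2, rfl⟩ := List.append_of_mem hk
        have h1 : List.IsChain (fun x y => E x y) (a :: l1 ++ [k]) := by
          refine hc.prefix ?_
          refine ⟨l2 ++ [b], ?_⟩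
          simp
        have h2 : List.IsChain (fun x y => E x y) (k :: l2 ++ [b]) := by
          refine hc.suffix ?_
          refine ⟨a :: l1, ?_⟩
          simp
        have hlen := hm
        simp only [List.length_append, List.length_cons] at hlen
        have hml1 : l1.length ≤ m := by omega
        have hml2 : l2.length ≤ m := by omega
        have ha : PathVia E S a k := by
          rcases ih a k l1 hml1 (fun v hv => hl v (by simp [hv])) h1 with h | ⟨h, _⟩
          · exact h
          · exact h
        have hb : PathVia E S k b := by
          rcases ih k b l2 hml2 (fun v hv => hl v (by simp [hv])) h2 with h | ⟨_, h⟩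
          · exact h
          · exact h
        exact Or.inr ⟨ha, hb⟩
      · refine Or.inl ⟨l, ?_, hc⟩
        intro v hv
        rcases hl v hv with h | h
        · exact h
        · subst h; exact absurd hv hk

lemma pathVia_union_k {E : Int → Int → Prop} {S : Int → Prop} {k a b : Int} :
    PathVia E (fun v => S v ∨ v = k) a b ↔
      PathVia E S a b ∨ (PathVia E S a k ∧ PathVia E S k b) := by
  constructor
  · rintro ⟨l, hl, hc⟩
    exact pathVia_elim_k l.length a b l le_rfl hl hc
  · rintro (h | ⟨h1, h2⟩)
    · exact pathVia_mono (fun v hv => Or.inl hv) h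
    · exact pathVia_trans_mid (pathVia_mono (fun v hv => Or.inl hv) h1) (Or.inr rfl)
        (pathVia_mono (fun v hv => Or.inl hv) h2)

lemma pathVia_false_iff {E : Int → Int → Prop} {a b : Int} :
    PathVia E (fun _ => False) a b ↔ E a b := by
  constructor
  · rintro ⟨l, hl, hc⟩
    cases l with
    | nil => simpa using hc
    | cons v t => exact absurd (hl v (by simp)) id
  · exact pathVia_single

lemma pathVia_flip {E : Int → Int → Prop} {S : Int → Prop} {a b : Int} :
    PathVia (fun x y => E y x) S a b ↔ PathVia E S b a := by
  constructor <;> rintro ⟨l, hl, hc⟩ <;> refine ⟨l.reverse, by simpa using hl, ?_⟩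
  · have := List.isChain_reverse.mpr hc
    simpa using this
  · have := List.isChain_reverse.mpr hc
    simpa using this

-- the Warshall fold computes exactly the paths through the processed intermediates
lemma closeFold_path (E : Int → Int → Prop) :
    ∀ (ks : List Int) (R : PySem.Set (Int × Int)) (S : Int → Prop),
      (∀ a b, (a, b) ∈ R ↔ PathVia E S a b) →
      ∀ a b, ((a, b) ∈ ks.foldl closeStep R ↔ PathVia E (fun v => S v ∨ v ∈ ks) a b) := by
  intro ks
  induction ks with
  | nil =>
      intro R S hR a b
      simp only [List.foldl_nil]
      rw [hR a b]
      exact (pathVia_congr (fun _ _ => Iff.rfl) (by simp) a b).symm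
  | cons k ks ih =>
      intro R S hR a b
      simp only [List.foldl_cons]
      have hstep : ∀ a b, (a, b) ∈ closeStep R k ↔ PathVia E (fun v => S v ∨ v = k) a b := by
        intro a b
        rw [mem_closeStep, pathVia_union_k]
        simp only [hR]
      rw [ih (closeStep R k) (fun v => S v ∨ v = k) hstep a b]
      exact pathVia_congr (fun _ _ => Iff.rfl) (by intro v; simp; tauto) a b

-- membership in A's closed relation = a path through intermediates 1..n
lemma closeB_path (n : Int) (results : List (List Int)) (a b : Int) :
    (a, b) ∈ closeB n (PySem.Set.ofList (results.filterMap unpack2)) ↔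
      PathVia (fun x y => (x, y) ∈ results.filterMap unpack2) (fun v => 1 ≤ v ∧ v ≤ n) a b := by
  unfold closeB
  rw [closeFold_path _ _ _ (fun _ => False)
    (by intro a b; rw [PySem.Set.mem_ofList, pathVia_false_iff]) a b]
  refine pathVia_congr (fun _ _ => Iff.rfl) ?_ a b
  intro v
  rw [PySem.List.mem_pyRange_one]
  constructor
  · rintro (h | h)
    · exact absurd h id
    · omega
  · intro h; right; omega

-- any path with in-range intermediates has a duplicate-free such path (repeatedly cutting
-- the cycle between two occurrences of a repeated intermediate)
lemma not_nodup_split {l : List Int} (h : ¬ l.Nodup) :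
    ∃ l1 v l2 l3, l = l1 ++ v :: l2 ++ v :: l3 := by
  induction l with
  | nil => exact absurd List.nodup_nil h
  | cons x t ih =>
      by_cases hx : x ∈ t
      · obtain ⟨t1, t2, rfl⟩ := List.append_of_mem hx
        exact ⟨[], x, t1, t2, by simp⟩
      · have ht : ¬ t.Nodup := by
          intro hnd
          exact h (List.nodup_cons.mpr ⟨hx, hnd⟩)
        obtain ⟨l1, v, l2, l3, rfl⟩ := ih ht
        exact ⟨x :: l1, v, l2, l3, by simp⟩

lemma pathVia_nodup {E : Int → Int → Prop} {S : Int → Prop} {a b : Int} :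
    PathVia E S a b → ∃ l : List Int, l.Nodup ∧ (∀ v ∈ l, S v) ∧
      List.IsChain (fun x y => E x y) (a :: l ++ [b]) := by
  rintro ⟨l, hl, hc⟩
  induction hm : l.length using Nat.strong_induction_on generalizing l with
  | _ m ih =>
    by_cases hnd : l.Nodup
    · exact ⟨l, hnd, hl, hc⟩
    · obtain ⟨l1, v, l2, l3, rfl⟩ := not_nodup_split hnd
      have h1 : List.IsChain (fun x y => E x y) (a :: l1 ++ [v]) := by
        refine hc.prefix ⟨l2 ++ v :: l3 ++ [b], ?_⟩
        simp
      have h2 : List.IsChain (fun x y => E x y) (v :: l3 ++ [b]) := by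
        refine hc.suffix ⟨a :: l1 ++ v :: l2, ?_⟩
        simp
      have hc' : List.IsChain (fun x y => E x y) (a :: (l1 ++ v :: l3) ++ [b]) := by
        have heq : a :: (l1 ++ v :: l3) ++ [b] = (a :: l1 ++ [v]) ++ (l3 ++ [b]) := by simp
        rw [heq]
        have h2' := List.isChain_cons.mp (by simpa using h2)
        refine List.IsChain.append h1 h2'.2 ?_
        intro x hx y hy
        have hlast : (a :: l1 ++ [v]).getLast? = some v := List.getLast?_concat
        rw [hlast] at hx
        simp at hx
        subst hx
        exact h2'.1 y hy
      have hl' : ∀ x ∈ l1 ++ v :: l3, S x := by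
        intro x hx
        refine hl x ?_
        rcases List.mem_append.mp hx with hx | hx
        · simp [hx]
        · rcases List.mem_cons.mp hx with hx | hx <;> simp [hx]
      have hlen : (l1 ++ v :: l3).length < m := by
        subst hm
        simp only [List.length_append, List.length_cons]
        omega
      exact ih _ hlen _ hl' hc' rfl

-- a duplicate-free list of integers in [1, n] has at most n.toNat elements
lemma nodup_inrange_length {n : Int} {l : List Int} (hnd : l.Nodup)
    (hl : ∀ v ∈ l, 1 ≤ v ∧ v ≤ n) : l.length ≤ n.toNat := by
  have hsub : l.toFinset ⊆ Finset.Icc (1 : Int) n := by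
    intro v hv
    rw [List.mem_toFinset] at hv
    rw [Finset.mem_Icc]
    exact hl v hv
  have h1 : l.toFinset.card = l.length := List.toFinset_card_of_nodup hnd
  have h2 := Finset.card_le_card hsub
  rw [Int.card_Icc] at h2
  omega

-- ===== BFS side =====
-- the edge relation read off an adjacency dict
def EA (adj : PySem.Dict Int (List Int)) (v w : Int) : Prop := w ∈ adj.getD v []

-- membership after the inner loop over one adjacency list
lemma bfsInner_mem :
    ∀ (ws : List Int) (S : PySem.Set Int) (acc : List Int),
      (∀ x ∈ acc, x ∈ S) → S.Nodup →
      (∀ w, w ∈ (bfsInner (S, acc) ws).1 ↔ w ∈ S ∨ w ∈ ws) ∧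
      (∀ w, w ∈ (bfsInner (S, acc) ws).2 ↔ w ∈ acc ∨ (w ∉ S ∧ w ∈ ws)) ∧
      (∀ x ∈ (bfsInner (S, acc) ws).2, x ∈ (bfsInner (S, acc) ws).1) ∧
      (bfsInner (S, acc) ws).1.Nodup := by
  intro ws
  induction ws with
  | nil =>
      intro S acc hacc hnd
      exact ⟨by simp [bfsInner], by simp [bfsInner], by simpa [bfsInner] using hacc,
        by simpa [bfsInner] using hnd⟩
  | cons w ws ih =>
      intro S acc hacc hnd
      by_cases hw : w ∈ S
      · have hstep : bfsInner (S, acc) (w :: ws) = bfsInner (S, acc) ws := by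
          simp [bfsInner, hw]
        rw [hstep]
        obtain ⟨m1, m2, msub, mnd⟩ := ih S acc hacc hnd
        refine ⟨?_, ?_, msub, mnd⟩
        · intro x; rw [m1 x]; simp only [List.mem_cons]
          constructor
          · rintro (h | h) <;> tauto
          · rintro (h | h | h)
            · tauto
            · subst h; tauto
            · tauto
        · intro x; rw [m2 x]; simp only [List.mem_cons]
          constructor
          · rintro (h | h) <;> tauto
          · rintro (h | ⟨h1, h2 | h2⟩)
            · tauto
            · subst h2; exact absurd hw h1
            · tauto
      · have hstep : bfsInner (S, acc) (w :: ws) =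
            bfsInner (PySem.Set.add S w, acc ++ [w]) ws := by
          simp [bfsInner, hw]
        rw [hstep]
        have hacc' : ∀ x ∈ acc ++ [w], x ∈ PySem.Set.add S w := by
          intro x hx
          rw [PySem.Set.mem_add]
          rcases List.mem_append.mp hx with hx | hx
          · exact Or.inl (hacc x hx)
          · simp at hx; exact Or.inr hx
        obtain ⟨m1, m2, msub, mnd⟩ := ih (PySem.Set.add S w) (acc ++ [w]) hacc'
          (PySem.Set.nodup_add _ _ hnd)
        refine ⟨?_, ?_, msub, mnd⟩
        · intro x; rw [m1 x, PySem.Set.mem_add]; simp only [List.mem_cons]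
          tauto
        · intro x; rw [m2 x, PySem.Set.mem_add]
          simp only [List.mem_append, List.mem_singleton, List.mem_cons]
          by_cases hxw : x = w
          · subst hxw; tauto
          · tauto

-- membership after one whole BFS level
lemma bfsRoundAux_mem (n : Int) (adj : PySem.Dict Int (List Int)) :
    ∀ (fr : List Int) (S : PySem.Set Int) (acc : List Int),
      (∀ x ∈ acc, x ∈ S) → S.Nodup →
      (∀ w, w ∈ (fr.foldl (fun st v => if 1 ≤ v ∧ v ≤ n then bfsInner st (adj.getD v [])
          else st) (S, acc)).1 ↔
        w ∈ S ∨ ∃ v ∈ fr, (1 ≤ v ∧ v ≤ n) ∧ w ∈ adj.getD v []) ∧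
      (∀ w, w ∈ (fr.foldl (fun st v => if 1 ≤ v ∧ v ≤ n then bfsInner st (adj.getD v [])
          else st) (S, acc)).2 ↔
        w ∈ acc ∨ (w ∉ S ∧ ∃ v ∈ fr, (1 ≤ v ∧ v ≤ n) ∧ w ∈ adj.getD v [])) ∧
      (∀ x ∈ (fr.foldl (fun st v => if 1 ≤ v ∧ v ≤ n then bfsInner st (adj.getD v [])
          else st) (S, acc)).2,
        x ∈ (fr.foldl (fun st v => if 1 ≤ v ∧ v ≤ n then bfsInner st (adj.getD v [])
          else st) (S, acc)).1) ∧
      (fr.foldl (fun st v => if 1 ≤ v ∧ v ≤ n then bfsInner st (adj.getD v [])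
          else st) (S, acc)).1.Nodup := by
  intro fr
  induction fr with
  | nil =>
      intro S acc hacc hnd
      refine ⟨by simp, by simp, by simpa using hacc, by simpa using hnd⟩
  | cons v fr ih =>
      intro S acc hacc hnd
      simp only [List.foldl_cons]
      by_cases hv : 1 ≤ v ∧ v ≤ n
      · rw [if_pos hv]
        obtain ⟨i1, i2, isub, ind⟩ := bfsInner_mem (adj.getD v []) S acc hacc hnd
        have hst : bfsInner (S, acc) (adj.getD v []) =
            ((bfsInner (S, acc) (adj.getD v [])).1, (bfsInner (S, acc) (adj.getD v [])).2) := rfl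
        rw [hst]
        obtain ⟨m1, m2, msub, mnd⟩ := ih _ _ isub ind
        refine ⟨?_, ?_, msub, mnd⟩
        · intro w; rw [m1 w, i1 w]
          simp only [List.mem_cons]
          constructor
          · rintro ((h | h) | ⟨u, hu, h1, h2⟩)
            · tauto
            · exact Or.inr ⟨v, Or.inl rfl, hv, h⟩
            · exact Or.inr ⟨u, Or.inr hu, h1, h2⟩
          · rintro (h | ⟨u, hu | hu, h1, h2⟩)
            · tauto
            · subst hu; tauto
            · exact Or.inr ⟨u, hu, h1, h2⟩
        · intro w; rw [m2 w, i2 w, i1 w]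
          simp only [List.mem_cons]
          constructor
          · rintro ((h | ⟨h1, h2⟩) | ⟨h1, u, hu, h3, h4⟩)
            · tauto
            · exact Or.inr ⟨h1, v, Or.inl rfl, hv, h2⟩
            · have hns : w ∉ S := fun hS => h1 (Or.inl hS)
              exact Or.inr ⟨hns, u, Or.inr hu, h3, h4⟩
          · rintro (h | ⟨h1, u, hu | hu, h3, h4⟩)
            · tauto
            · subst hu; exact Or.inl (Or.inr ⟨h1, h4⟩)
            · by_cases hwv : w ∈ adj.getD v []
              · exact Or.inl (Or.inr ⟨h1, hwv⟩)
              · refine Or.inr ⟨?_, u, hu, h3, h4⟩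
                intro hS
                rcases hS with hS | hS
                · exact h1 hS
                · exact hwv hS
      · rw [if_neg hv]
        obtain ⟨m1, m2, msub, mnd⟩ := ih S acc hacc hnd
        refine ⟨?_, ?_, msub, mnd⟩
        · intro w; rw [m1 w]
          simp only [List.mem_cons]
          constructor
          · rintro (h | ⟨u, hu, h1, h2⟩)
            · tauto
            · exact Or.inr ⟨u, Or.inr hu, h1, h2⟩
          · rintro (h | ⟨u, hu | hu, h1, h2⟩)
            · tauto
            · subst hu; exact absurd h1 hv
            · exact Or.inr ⟨u, hu, h1, h2⟩
        · intro w; rw [m2 w]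
          simp only [List.mem_cons]
          constructor
          · rintro (h | ⟨h1, u, hu, h3, h4⟩)
            · tauto
            · exact Or.inr ⟨h1, u, Or.inr hu, h3, h4⟩
          · rintro (h | ⟨h1, u, hu | hu, h3, h4⟩)
            · tauto
            · subst hu; exact absurd h3 hv
            · exact Or.inr ⟨h1, u, hu, h3, h4⟩

-- the BFS loop invariant
def BfsInv (n : Int) (adj : PySem.Dict Int (List Int)) (i : Int)
    (S : PySem.Set Int) (F : List Int) : Prop :=
  (∀ x ∈ F, x ∈ S) ∧ S.Nodup ∧
  (∀ w ∈ S, PathVia (EA adj) (fun v => 1 ≤ v ∧ v ≤ n) i w) ∧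
  (∀ v, v ∈ S → v ∉ F → 1 ≤ v ∧ v ≤ n → ∀ w ∈ adj.getD v [], w ∈ S)

-- "S already contains the endpoint of every admissible path with < d edges beyond the first"
def Covers (n : Int) (adj : PySem.Dict Int (List Int)) (i : Int)
    (S : PySem.Set Int) (d : Nat) : Prop :=
  ∀ (l : List Int) (b : Int), l.length + 1 ≤ d → (∀ v ∈ l, 1 ≤ v ∧ v ≤ n) →
    List.IsChain (fun x y => EA adj x y) (i :: l ++ [b]) → b ∈ S

lemma covers_mono_d {n : Int} {adj : PySem.Dict Int (List Int)} {i : Int}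
    {S : PySem.Set Int} {d d' : Nat} (hd : d' ≤ d)
    (h : Covers n adj i S d) : Covers n adj i S d' := by
  intro l b hlen hl hc
  exact h l b (le_trans hlen hd) hl hc

-- one BFS level preserves the invariant
lemma bfsRound_inv {n : Int} {adj : PySem.Dict Int (List Int)} {i : Int}
    {S : PySem.Set Int} {F : List Int} (h : BfsInv n adj i S F) :
    BfsInv n adj i (bfsRound n adj S F).1 (bfsRound n adj S F).2 := by
  obtain ⟨hFS, hnd, hpath, hclosed⟩ := h
  obtain ⟨m1, m2, msub, mnd⟩ := bfsRoundAux_mem n adj F S [] (by simp) hnd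
  refine ⟨msub, mnd, ?_, ?_⟩
  · intro w hw
    rcases (m1 w).mp hw with hS | ⟨v, hvF, hvr, hvw⟩
    · exact hpath w hS
    · exact pathVia_snoc (hpath v (hFS v hvF)) hvr hvw
  · intro v hvS hvF hvr w hw
    by_cases hvSold : v ∈ S
    · by_cases hvFold : v ∈ F
      · exact (m1 w).mpr (Or.inr ⟨v, hvFold, hvr, hw⟩)
      · exact (m1 w).mpr (Or.inl (hclosed v hvSold hvFold hvr w hw))
    · -- v was newly discovered this round, so it is in the new frontier — contradiction
      exfalso
      rcases (m1 v).mp hvS with hS | hnew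
      · exact hvSold hS
      · exact hvF ((m2 v).mpr (Or.inr ⟨hvSold, hnew⟩))

-- one BFS level extends coverage by one edge
lemma bfsRound_covers {n : Int} {adj : PySem.Dict Int (List Int)} {i : Int}
    {S : PySem.Set Int} {F : List Int} {d : Nat} (hd : 1 ≤ d)
    (hinv : BfsInv n adj i S F) (hcov : Covers n adj i S d) :
    Covers n adj i (bfsRound n adj S F).1 (d + 1) := by
  obtain ⟨hFS, hnd, hpath, hclosed⟩ := hinv
  obtain ⟨m1, m2, msub, mnd⟩ := bfsRoundAux_mem n adj F S [] (by simp) hnd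
  intro l b hlen hl hc
  by_cases hshort : l.length + 1 ≤ d
  · exact (m1 b).mpr (Or.inl (hcov l b hshort hl hc))
  · -- l.length = d, so l ≠ []; split off the last intermediate
    rcases List.eq_nil_or_concat l with rfl | ⟨l', v, rfl⟩
    · simp at hlen hshort; omega
    simp only [List.concat_eq_append] at hl hc hlen ⊢
    have hlen' : l'.length + 1 ≤ d := by
      simp only [List.length_append, List.length_singleton] at hlen
      omega
    have hcpre : List.IsChain (fun x y => EA adj x y) (i :: l' ++ [v]) := by
      refine hc.prefix ⟨[b], ?_⟩
      simp
    have hvS : v ∈ S := hcov l' v hlen' (fun u hu => hl u (by simp [hu])) hcpre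
    have hvr : 1 ≤ v ∧ v ≤ n := hl v (by simp)
    have hedge : EA adj v b := by
      have hsuf : List.IsChain (fun x y => EA adj x y) [v, b] := by
        refine hc.suffix ⟨i :: l', ?_⟩
        simp
      exact List.isChain_pair.mp hsuf
    by_cases hvF : v ∈ F
    · exact (m1 b).mpr (Or.inr ⟨v, hvF, hvr, hedge⟩)
    · exact (m1 b).mpr (Or.inl (hclosed v hvS hvF hvr b hedge))

-- once the frontier is empty the seen set is closed and covers every depth
lemma closed_covers {n : Int} {adj : PySem.Dict Int (List Int)} {i : Int}
    {S : PySem.Set Int} {d0 : Nat} (hd0 : 1 ≤ d0)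
    (hinv : BfsInv n adj i S []) (hcov : Covers n adj i S d0) :
    ∀ d, Covers n adj i S d := by
  obtain ⟨_, _, _, hclosed⟩ := hinv
  have hcov1 : Covers n adj i S 1 := covers_mono_d hd0 hcov
  intro d
  induction d with
  | zero => intro l b hlen; omega
  | succ d ihd =>
      intro l b hlen hl hc
      rcases List.eq_nil_or_concat l with rfl | ⟨l', v, rfl⟩
      · exact hcov1 [] b (by simp) (by simp) hc
      simp only [List.concat_eq_append] at hl hc hlen ⊢
      by_cases hshort : (l' ++ [v]).length + 1 ≤ d
      · exact ihd (l' ++ [v]) b hshort hl hc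
      · have hlen' : l'.length + 1 ≤ d := by
          simp only [List.length_append, List.length_singleton] at hlen hshort
          omega
        have hcpre : List.IsChain (fun x y => EA adj x y) (i :: l' ++ [v]) := by
          refine hc.prefix ⟨[b], ?_⟩
          simp
        have hvS : v ∈ S := ihd l' v hlen' (fun u hu => hl u (by simp [hu])) hcpre
        have hvr : 1 ≤ v ∧ v ≤ n := hl v (by simp)
        have hedge : EA adj v b := by
          have hsuf : List.IsChain (fun x y => EA adj x y) [v, b] := by
            refine hc.suffix ⟨i :: l', ?_⟩
            simp
          exact List.isChain_pair.mp hsuf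
        exact hclosed v hvS (by simp) hvr b hedge

lemma bfsLoop_spec {n : Int} {adj : PySem.Dict Int (List Int)} {i : Int} :
    ∀ (m : Nat) (S : PySem.Set Int) (F : List Int) (d : Nat), 1 ≤ d →
      BfsInv n adj i S F → Covers n adj i S d →
      (∀ w ∈ bfsLoop n adj m (S, F), PathVia (EA adj) (fun v => 1 ≤ v ∧ v ≤ n) i w) ∧
      (bfsLoop n adj m (S, F)).Nodup ∧ Covers n adj i (bfsLoop n adj m (S, F)) (d + m) := by
  intro m
  induction m with
  | zero =>
      intro S F d hd hinv hcov
      exact ⟨hinv.2.2.1, hinv.2.1, hcov⟩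
  | succ m ih =>
      intro S F d hd hinv hcov
      by_cases hF : F = []
      · subst hF
        simp only [bfsLoop, if_pos rfl]
        exact ⟨hinv.2.2.1, hinv.2.1, closed_covers hd hinv hcov (d + (m + 1))⟩
      · have hstep : bfsLoop n adj (m + 1) (S, F) =
            bfsLoop n adj m ((bfsRound n adj S F).1, (bfsRound n adj S F).2) := by
          simp only [bfsLoop, if_neg hF]
        rw [hstep]
        have hinv' := bfsRound_inv hinv
        have hcov' := bfsRound_covers hd hinv hcov
        have := ih (bfsRound n adj S F).1 (bfsRound n adj S F).2 (d + 1) (by omega) hinv' hcov'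
        refine ⟨this.1, this.2.1, ?_⟩
        have heq : d + 1 + m = d + (m + 1) := by omega
        rw [heq] at this
        exact this.2.2

-- full characterisation of B's reach set
lemma reachB_spec (n : Int) (adj : PySem.Dict Int (List Int)) (i : Int) :
    (∀ w, w ∈ reachB n adj i ↔ PathVia (EA adj) (fun v => 1 ≤ v ∧ v ≤ n) i w) ∧
    (reachB n adj i).Nodup := by
  have hinv : BfsInv n adj i (PySem.Set.ofList (adj.getD i [])) (adj.getD i []) := by
    refine ⟨?_, PySem.Set.nodup_ofList _, ?_, ?_⟩
    · intro x hx; rw [PySem.Set.mem_ofList]; exact hx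
    · intro w hw
      rw [PySem.Set.mem_ofList] at hw
      exact pathVia_single hw
    · intro v hvS hvF
      rw [PySem.Set.mem_ofList] at hvS
      exact absurd hvS hvF
  have hcov : Covers n adj i (PySem.Set.ofList (adj.getD i [])) 1 := by
    intro l b hlen hl hc
    have hlnil : l = [] := by
      cases l with
      | nil => rfl
      | cons x t => simp at hlen
    subst hlnil
    rw [PySem.Set.mem_ofList]
    exact List.isChain_pair.mp (by simpa using hc)
  obtain ⟨hsound, hnd, hcovf⟩ :=
    bfsLoop_spec n.toNat (PySem.Set.ofList (adj.getD i [])) (adj.getD i []) 1 le_rfl hinv hcov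
  refine ⟨?_, hnd⟩
  intro w
  constructor
  · exact hsound w
  · intro hp
    obtain ⟨l, hlnd, hl, hc⟩ := pathVia_nodup hp
    have hlen : l.length ≤ n.toNat := nodup_inrange_length hlnd hl
    exact hcovf l w (by omega) hl hc

-- B's adjacency dicts read back the direct results
lemma buildAdj_mem (results : List (List Int)) (v w : Int) :
    (w ∈ (buildAdj results).1.getD v [] ↔ (v, w) ∈ results.filterMap unpack2) ∧
    (w ∈ (buildAdj results).2.getD v [] ↔ (w, v) ∈ results.filterMap unpack2) := by
  have key : ∀ (rs : List (List Int)) (st : PySem.Dict Int (List Int) × PySem.Dict Int (List Int))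
      (v w : Int),
      (w ∈ (rs.foldl buildAdjStep st).1.getD v [] ↔
        w ∈ st.1.getD v [] ∨ (v, w) ∈ rs.filterMap unpack2) ∧
      (w ∈ (rs.foldl buildAdjStep st).2.getD v [] ↔
        w ∈ st.2.getD v [] ∨ (w, v) ∈ rs.filterMap unpack2) := by
    intro rs
    induction rs with
    | nil => intro st v w; simp
    | cons r rs ih =>
        intro st v w
        rcases r with _ | ⟨a, _ | ⟨b, _ | ⟨x, t⟩⟩⟩
        · simpa [buildAdjStep, unpack2] using ih st v w
        · simpa [buildAdjStep, unpack2] using ih st v w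
        · -- r = [a, b]
          have hih := ih (buildAdjStep st [a, b]) v w
          simp only [List.foldl_cons] at *
          constructor
          · rw [hih.1]
            simp only [buildAdjStep, adjAdd, unpack2, List.filterMap_cons,
              PySem.Dict.getD_insert]
            by_cases hva : v = a
            · subst hva
              rw [if_pos rfl]
              simp only [List.mem_append, List.mem_singleton, List.mem_cons, Prod.mk.injEq]
              tauto
            · rw [if_neg hva]
              simp only [List.mem_cons, Prod.mk.injEq]
              tauto
          · rw [hih.2]
            simp only [buildAdjStep, adjAdd, unpack2, List.filterMap_cons,
              PySem.Dict.getD_insert]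
            by_cases hvb : v = b
            · subst hvb
              rw [if_pos rfl]
              simp only [List.mem_append, List.mem_singleton, List.mem_cons, Prod.mk.injEq]
              tauto
            · rw [if_neg hvb]
              simp only [List.mem_cons, Prod.mk.injEq]
              tauto
        · simpa [buildAdjStep, unpack2] using ih st v w
  have h := key results (PySem.Dict.empty, PySem.Dict.empty) v w
  simpa [buildAdj] using h

-- two duplicate-free lists with the same members have the same length
lemma len_eq_of_mem_iff {s t : List Int} (hs : s.Nodup) (ht : t.Nodup)
    (h : ∀ x, x ∈ s ↔ x ∈ t) : s.length = t.length :=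
  ((List.perm_ext_iff_of_nodup hs ht).mpr h).length_eq

-- the two counting loops agree once their branch conditions agree pointwise
lemma foldl_count_congr (p q : Int → Prop) [DecidablePred p] [DecidablePred q]
    (h : ∀ i, p i ↔ q i) :
    ∀ (ks : List Int) (acc : Int),
      ks.foldl (fun a i => if p i then a + 1 else a) acc =
      ks.foldl (fun a i => if q i then a + 1 else a) acc := by
  intro ks
  induction ks with
  | nil => intro acc; rfl
  | cons k ks ih =>
      intro acc
      simp only [List.foldl_cons]
      rw [if_congr (h k) rfl rfl]
      exact ih _

-- ===== VERDICT (by name: the statement is the Claim_ definition above) =====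
theorem solution_spec : Claim_equal_solution := by
  intro n results _ _
  unfold Spec_solution solution solution_alt
  obtain ⟨hW, hL, hndW, hndL, hndR⟩ := stInv_final n results
  refine foldl_count_congr _ _ ?_ _ _
  intro i
  have hf := reachB_spec n (buildAdj results).1 i
  have hb := reachB_spec n (buildAdj results).2 i
  have e1 : ((passA n (buildA results)).2.getD i PySem.Set.empty).length =
      (reachB n (buildAdj results).1 i).length := by
    refine len_eq_of_mem_iff (hndL i) hf.2 ?_
    intro b
    rw [hL i b, closeB_path, hf.1 b]
    exact pathVia_congr (fun x y => ((buildAdj_mem results x y).1).symm)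
      (fun _ => Iff.rfl) i b
  have e2 : ((passA n (buildA results)).1.getD i PySem.Set.empty).length =
      (reachB n (buildAdj results).2 i).length := by
    refine len_eq_of_mem_iff (hndW i) hb.2 ?_
    intro a
    rw [hW a i, closeB_path, hb.1 a]
    constructor
    · intro hp
      exact (pathVia_congr (fun x y => ((buildAdj_mem results x y).2))
        (fun _ => Iff.rfl) i a).mpr (pathVia_flip.mpr hp)
    · intro hp
      exact pathVia_flip.mp ((pathVia_congr (fun x y => ((buildAdj_mem results x y).2))
        (fun _ => Iff.rfl) i a).mp hp)
  simp only [PySem.Set.len]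
  rw [e1, e2]
  constructor <;> intro h <;> omega
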